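-- pv_equiv track=rewrite | github.com/kage1011/DataAnalyst_FireForest | app.py | convertTo12Month
-- ===== SOURCE A (Python) =====
-- def convertTo12Month(arr , m): # m la month chua xu ly, arr la tap du lieu can xu ly theo month
--
--     j = 0
--     k , a, convertValue, monthOfYear = 0, m[j], [], []
--     monthOfYear.append(a)
--
--
--     while j < len(m):
--         if m[j] == a:
--             k = k + arr[j]
--             j += 1
--             if j == len(m):
--                 convertValue.append(k)
--         else:
--             convertValue.append(k)
--             k = 0
--             a = m[j]
--             monthOfYear.append(a)
--     return convertValue
-- ===== SOURCE B (Python) =====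
-- def convertTo12Month(arr, m):
--     # Run-splitting: find the end j of each maximal run of equal months
--     # starting at i, emit the sum of the matching slice of arr, jump to j.
--     out = []
--     i, n = 0, len(m)
--     while i < n:
--         j = i + 1
--         while j < n and m[j] == m[i]:
--             j += 1
--         out.append(sum(arr[i:j]))
--         i = j
--     return out
-- ===== Notes on version B (the rewrite author's own statement) =====
-- stated objective: alternative
-- what changed: Replaces A's single element-wise accumulator loop (running sum k, current month a, flush-on-change with an end-of-list special case) by run-splitting: an inner scan finds the end j of each maximal run of equal months and B emits sum(arr[i:j]) in one step, jumping i to j.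
import Mathlib
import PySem

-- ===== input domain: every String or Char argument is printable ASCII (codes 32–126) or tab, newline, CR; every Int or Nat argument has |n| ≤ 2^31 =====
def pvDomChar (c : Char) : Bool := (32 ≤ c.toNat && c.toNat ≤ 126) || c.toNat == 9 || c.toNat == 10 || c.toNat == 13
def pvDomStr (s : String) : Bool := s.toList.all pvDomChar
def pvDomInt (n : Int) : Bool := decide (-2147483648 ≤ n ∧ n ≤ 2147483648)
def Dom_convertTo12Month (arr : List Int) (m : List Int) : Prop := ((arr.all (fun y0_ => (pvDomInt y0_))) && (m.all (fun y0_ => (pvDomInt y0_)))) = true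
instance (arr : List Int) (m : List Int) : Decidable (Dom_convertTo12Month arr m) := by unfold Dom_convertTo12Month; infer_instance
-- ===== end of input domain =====

-- B replaces A's index-walking accumulator loop by run-splitting over maximal
-- runs of equal months (an alternative decomposition of the same task).
-- ===== PORT A =====
-- A's while loop; state (j, k, a, convertValue, monthOfYear). monthOfYear is
-- write-only and never returned, but is carried faithfully as `moy`.
-- `fuel` only makes the recursion total: the loop runs at most 2*len(m)+1 steps.
-- Where Python would raise IndexError on arr[j] (pyGet? = none) the port
-- returns the accumulator; such inputs are excluded by Pre_.
def convertTo12MonthLoop (fuel : Nat) (arr m : List Int) (j : Nat) (k a : Int) (cv moy : List Int) : List Int :=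
  match fuel with
  | 0 => cv
  | fuel + 1 =>
    if j < m.length then
      if m.getD j 0 = a then
        match PySem.List.pyGet? arr (j : Int) with
        | none => cv      -- IndexError in Python; outside Pre_
        | some v =>
          convertTo12MonthLoop fuel arr m (j + 1) (k + v) a
            (if j + 1 = m.length then cv ++ [k + v] else cv) moy
      else
        convertTo12MonthLoop fuel arr m j 0 (m.getD j 0) (cv ++ [k]) (moy ++ [m.getD j 0])
    else cv

def convertTo12Month (arr : List Int) (m : List Int) : List Int :=
  match PySem.List.pyGet? m (0 : Int) with
  | none => []          -- IndexError on m[0] in Python; outside Pre_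
  | some a => convertTo12MonthLoop (2 * m.length + 1) arr m 0 0 a [] [a]

-- ===== PORT B =====
-- Source B's inner while: scan j forward while j < len(m) and m[j] == m[i].
-- `fuel` only makes the recursion total (len(m) steps suffice).
def convertTo12MonthRunEnd (fuel : Nat) (m : List Int) (i j : Nat) : Nat :=
  match fuel with
  | 0 => j
  | fuel + 1 =>
    if j < m.length then
      if m.getD j 0 = m.getD i 0 then convertTo12MonthRunEnd fuel m i (j + 1) else j
    else j

-- Source B's outer while; `fuel` only makes the recursion total (i strictly grows).
-- sum(arr[i:j]) with 0 ≤ i ≤ j is exactly ((arr.drop i).take (j - i)).sum.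
def convertTo12MonthAltGo (fuel : Nat) (arr m : List Int) (i : Nat) : List Int :=
  match fuel with
  | 0 => []
  | fuel + 1 =>
    if i < m.length then
      let j := convertTo12MonthRunEnd m.length m i (i + 1)
      ((arr.drop i).take (j - i)).sum :: convertTo12MonthAltGo fuel arr m j
    else []

def convertTo12Month_alt (arr : List Int) (m : List Int) : List Int :=
  convertTo12MonthAltGo m.length arr m 0

-- ===== PRECONDITION & SPEC =====
-- Pre_ excludes exactly the inputs on which A raises IndexError: empty m (m[0])
-- and arr shorter than m (arr[j]).
def Pre_convertTo12Month (arr : List Int) (m : List Int) : Prop :=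
  m ≠ [] ∧ m.length ≤ arr.length
instance (arr : List Int) (m : List Int) : Decidable (Pre_convertTo12Month arr m) := by
  unfold Pre_convertTo12Month; infer_instance

def pvWitness_convertTo12Month : List Int × List Int := ([1, 2, 3], [4, 4, 5])

def Spec_convertTo12Month (arr : List Int) (m : List Int) (out : List Int) : Prop :=
  out = convertTo12Month_alt arr m
instance (arr : List Int) (m : List Int) (out : List Int) : Decidable (Spec_convertTo12Month arr m out) := by
  unfold Spec_convertTo12Month; infer_instance

-- ===== CLAIM (what is proved, stated in full; the proofs are below) =====
def Claim_equal_convertTo12Month : Prop := ∀ (arr : List Int) (m : List Int), Dom_convertTo12Month arr m → Pre_convertTo12Month arr m → Spec_convertTo12Month arr m (convertTo12Month arr m)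

-- ===== LEMMAS AND PROOFS =====

-- length of the leading run of v (specification layer for the inner scan)
def runLen (v : Int) : List Int → Nat
  | [] => 0
  | x :: xs => if x = v then runLen v xs + 1 else 0

-- list-level (drop/take) rendering of B's run-splitting (proof helper)
def altList (fuel : Nat) (arr m : List Int) : List Int :=
  match fuel, m with
  | _, [] => []
  | 0, _ => []
  | fuel + 1, x :: xs =>
    (arr.take (1 + runLen x xs)).sum ::
      altList fuel (arr.drop (1 + runLen x xs)) ((x :: xs).drop (1 + runLen x xs))

def altSpec (arr m : List Int) : List Int := altList m.length arr m

-- list-level rendering of A's loop (proof helper; the else step, which does not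
-- advance j, is inlined with its immediately following matching step)
def aList (arr m : List Int) (k a : Int) : List Int :=
  match m with
  | [] => []
  | x :: xs =>
    if x = a then
      match arr with
      | [] => []
      | v :: vs => if xs = [] then [k + v] else aList vs xs (k + v) a
    else
      k :: (match arr with
            | [] => []
            | v :: vs => if xs = [] then [0 + v] else aList vs xs (0 + v) x)

theorem altGo_congr (f₁ : Nat) : ∀ (f₂ : Nat) (arr m : List Int), m.length ≤ f₁ → m.length ≤ f₂ →
    altList f₁ arr m = altList f₂ arr m := by
  induction f₁ with
  | zero =>
    intro f₂ arr m h1 _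
    rcases m with _ | ⟨x, xs⟩
    · cases f₂ <;> rfl
    · simp at h1
  | succ f ih =>
    intro f₂ arr m h1 h2
    rcases m with _ | ⟨x, xs⟩
    · cases f₂ <;> rfl
    · rcases f₂ with _ | f₂
      · simp at h2
      · simp only [altList]
        congr 1
        apply ih
        · simp at h1 ⊢; omega
        · simp at h2 ⊢; omega

theorem alt_cons (arr : List Int) (x : Int) (xs : List Int) :
    altSpec arr (x :: xs) =
      (arr.take (1 + runLen x xs)).sum ::
        altSpec (arr.drop (1 + runLen x xs)) (xs.drop (runLen x xs)) := by
  have hdd : (x :: xs).drop (1 + runLen x xs) = xs.drop (runLen x xs) := by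
    rw [show 1 + runLen x xs = runLen x xs + 1 by omega, List.drop_succ_cons]
  unfold altSpec
  simp only [List.length_cons, altList]
  congr 1
  rw [hdd]
  apply altGo_congr
  · simp
  · exact le_rfl

-- aList starting a fresh run equals B's run-splitting
theorem aList_eq_alt (xs : List Int) : ∀ (arr : List Int) (k x : Int),
    xs.length < arr.length →
    aList arr (x :: xs) k x =
      (k + (arr.take (1 + runLen x xs)).sum) ::
        altSpec (arr.drop (1 + runLen x xs)) (xs.drop (runLen x xs)) := by
  induction xs with
  | nil =>
    intro arr k x h
    rcases arr with _ | ⟨v, vs⟩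
    · simp at h
    · simp [aList, runLen, altSpec, altList]
  | cons y ys ih =>
    intro arr k x h
    rcases arr with _ | ⟨v, vs⟩
    · simp at h
    simp only [List.length_cons] at h
    have hstep : aList (v :: vs) (x :: y :: ys) k x = aList vs (y :: ys) (k + v) x := by
      rw [aList]; simp
    rw [hstep]
    by_cases hy : y = x
    · subst hy
      rw [ih vs (k + v) y (by omega)]
      have hrl : runLen y (y :: ys) = runLen y ys + 1 := by simp [runLen]
      rw [hrl]
      rw [show 1 + (runLen y ys + 1) = (1 + runLen y ys) + 1 by omega]
      simp only [List.take_succ_cons, List.drop_succ_cons, List.sum_cons]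
      rw [add_assoc]
    · have hne : aList vs (y :: ys) (k + v) x = (k + v) :: aList vs (y :: ys) 0 y := by
        rcases vs with _ | ⟨v', vs'⟩
        · simp at h
        · rw [aList, aList]
          simp [hy]
      rw [hne, ih vs 0 y (by omega)]
      have hrl : runLen x (y :: ys) = 0 := by simp [runLen, hy]
      rw [hrl]
      simp only [Nat.add_zero, List.take_succ_cons, List.take_zero, List.sum_cons,
        List.sum_nil, List.drop_succ_cons, List.drop_zero]
      rw [alt_cons]
      simp

theorem drop_cons_getD (m : List Int) (j : Nat) (hj : j < m.length) :
    m.drop j = m.getD j 0 :: m.drop (j + 1) := by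
  rw [List.getD_eq_getElem m 0 hj]
  exact (List.getElem_cons_drop hj).symm

theorem aList_else (d t : List Int) (k a g : Int) (h : g ≠ a) :
    aList d (g :: t) k a = k :: aList d (g :: t) 0 g := by
  conv_lhs => rw [aList.eq_def]
  conv_rhs => rw [aList.eq_def]
  simp [h]

-- the inner scan computes i+1 plus the leading-run length of m[i] in m[j:]
theorem runEnd_spec (m : List Int) : ∀ (f i j : Nat), m.length - j ≤ f →
    convertTo12MonthRunEnd f m i j = j + runLen (m.getD i 0) (m.drop j) := by
  intro f
  induction f with
  | zero =>
    intro i j h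
    rw [convertTo12MonthRunEnd, List.drop_eq_nil_of_le (as := m) (by omega)]
    simp [runLen]
  | succ f ih =>
    intro i j h
    rw [convertTo12MonthRunEnd]
    by_cases hj : j < m.length
    · rw [if_pos hj]
      by_cases he : m.getD j 0 = m.getD i 0
      · rw [if_pos he, ih i (j + 1) (by omega), drop_cons_getD m j hj, he]
        simp [runLen]
        omega
      · rw [if_neg he, drop_cons_getD m j hj]
        simp only [runLen, if_neg he]
        omega
    · rw [if_neg hj, List.drop_eq_nil_of_le (as := m) (by omega)]
      simp [runLen]

-- B's fueled index loop equals the list-level run-splitting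
theorem altGo_eq_spec (arr m : List Int) : ∀ (f i : Nat), m.length - i ≤ f →
    convertTo12MonthAltGo f arr m i = altSpec (arr.drop i) (m.drop i) := by
  intro f
  induction f with
  | zero =>
    intro i h
    rw [convertTo12MonthAltGo, List.drop_eq_nil_of_le (as := m) (by omega)]
    rfl
  | succ f ih =>
    intro i h
    rw [convertTo12MonthAltGo]
    by_cases hi : i < m.length
    · rw [if_pos hi]
      rw [show convertTo12MonthRunEnd m.length m i (i + 1)
            = i + 1 + runLen (m.getD i 0) (m.drop (i + 1))
          from runEnd_spec m m.length i (i + 1) (by omega)]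
      show ((arr.drop i).take (i + 1 + runLen (m.getD i 0) (m.drop (i + 1)) - i)).sum
            :: convertTo12MonthAltGo f arr m (i + 1 + runLen (m.getD i 0) (m.drop (i + 1)))
          = altSpec (arr.drop i) (m.drop i)
      rw [drop_cons_getD m i hi, alt_cons]
      rw [show i + 1 + runLen (m.getD i 0) (m.drop (i + 1)) - i
            = 1 + runLen (m.getD i 0) (m.drop (i + 1)) from by omega]
      congr 1
      rw [ih (i + 1 + runLen (m.getD i 0) (m.drop (i + 1))) (by omega)]
      congr 1
      · rw [List.drop_drop]
        congr 1
        omega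
      · rw [List.drop_drop]
    · rw [if_neg hi, List.drop_eq_nil_of_le (as := m) (by omega)]
      rfl

theorem alt_eq_altSpec (arr m : List Int) : convertTo12Month_alt arr m = altSpec arr m := by
  unfold convertTo12Month_alt
  rw [altGo_eq_spec arr m m.length 0 (by omega)]
  simp

-- A's fueled index loop equals the list-level rendering
theorem bridge (arr m : List Int) : ∀ (f j : Nat) (k a : Int) (cv moy : List Int),
    2 * (m.length - j) + 1 + (if m.getD j 0 = a then 0 else 1) ≤ f →
    convertTo12MonthLoop f arr m j k a cv moy = cv ++ aList (arr.drop j) (m.drop j) k a := by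
  intro f
  induction f with
  | zero => intro j k a cv moy hf; split_ifs at hf <;> omega
  | succ f ih =>
    intro j k a cv moy hf
    by_cases hj : j < m.length
    · rw [convertTo12MonthLoop, if_pos hj]
      by_cases ha : m.getD j 0 = a
      · rw [if_pos ha, PySem.List.pyGet?_natCast]
        rcases e : arr[j]? with _ | v
        · -- arr[j] out of range (Python IndexError): arr.drop j = []
          have hlen : arr.length ≤ j := by
            by_contra hlt
            rw [List.getElem?_eq_getElem (by omega)] at e
            simp at e
          rw [List.drop_eq_nil_of_le hlen, drop_cons_getD m j hj, ha, aList]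
          simp
        · have hjl : j < arr.length := by
            by_contra hge
            rw [List.getElem?_eq_none (by omega)] at e
            simp at e
          have harr : arr.drop j = v :: arr.drop (j + 1) := by
            rw [List.drop_eq_getElem_cons hjl]
            rw [List.getElem?_eq_getElem hjl] at e
            simp only [Option.some.injEq] at e
            rw [e]
          dsimp only
          by_cases hend : j + 1 = m.length
          · rw [if_pos hend]
            have hdrop : m.drop (j + 1) = [] := List.drop_eq_nil_of_le (by omega)
            rw [ih (j + 1) (k + v) a (cv ++ [k + v]) moy (by
              rw [List.getD_eq_default m 0 (by omega)]
              split_ifs at hf ⊢ <;> omega)]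
            rw [hdrop, drop_cons_getD m j hj, ha, harr, aList, aList]
            simp [hdrop]
          · rw [if_neg hend]
            rw [ih (j + 1) (k + v) a cv moy (by split_ifs at hf ⊢ <;> omega)]
            rw [drop_cons_getD m j hj, ha, harr, aList]
            have hnn : m.drop (j + 1) ≠ [] := by
              intro hnil
              have hl := List.length_drop (i := j + 1) (l := m)
              rw [hnil] at hl
              simp at hl
              omega
            simp [hnn]
      · rw [if_neg ha]
        rw [ih j 0 (m.getD j 0) (cv ++ [k]) (moy ++ [m.getD j 0]) (by
          rw [if_pos rfl]; split_ifs at hf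
          all_goals omega)]
        rw [drop_cons_getD m j hj,
          aList_else (arr.drop j) (m.drop (j + 1)) k a (m.getD j 0) (fun hx => ha hx)]
        simp
    · rw [convertTo12MonthLoop, if_neg hj]
      rw [List.drop_eq_nil_of_le (as := m) (by omega)]
      simp [aList]

-- ===== VERDICT (by name: the statement is the Claim_ definition above) =====
theorem convertTo12Month_spec : Claim_equal_convertTo12Month := by
  intro arr m _ hpre
  rcases hpre with ⟨hne, hlen⟩
  rcases m with _ | ⟨x, xs⟩
  · exact absurd rfl hne
  unfold Spec_convertTo12Month convertTo12Month
  rw [PySem.List.pyGet?_zero_cons]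
  dsimp only
  rw [bridge arr (x :: xs) (2 * (x :: xs).length + 1) 0 0 x [] [x] (by simp [List.getD])]
  simp only [List.drop_zero, List.nil_append]
  rw [alt_eq_altSpec, aList_eq_alt xs arr 0 x (by simpa using hlen), alt_cons]
  simp
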